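-- pv_equiv track=rewrite | github.com/rransom8774/pkpsig-python-ref-impl-old-work | pkpsig/common.py | split_sequence_fields
-- ===== SOURCE A (Python) =====
-- def split_sequence_fields(x, fieldlengths):
--     rv = []
--     prev = 0
--     for fieldlen in fieldlengths:
--         end = prev + fieldlen
--         rv.append(x[prev:end])
--         prev = end
--         pass
--     assert(prev == len(x))
--     return rv
-- ===== SOURCE B (Python) =====
-- def split_sequence_fields(x, fieldlengths):
--     assert sum(fieldlengths) == len(x)
--     def go(fls, end):
--         if not fls:
--             return []
--         *init, last = fls
--         return go(init, end - last) + [x[end - last:end]]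
--     return go(fieldlengths, len(x))
-- ===== Notes on version B (the rewrite author's own statement) =====
-- stated objective: alternative
-- what changed: Replaces the forward loop with a start accumulator by recursion that splits off the LAST field, threads an end pointer downward and builds the result back-to-front, with the consumption check hoisted to the front.
import Mathlib
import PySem

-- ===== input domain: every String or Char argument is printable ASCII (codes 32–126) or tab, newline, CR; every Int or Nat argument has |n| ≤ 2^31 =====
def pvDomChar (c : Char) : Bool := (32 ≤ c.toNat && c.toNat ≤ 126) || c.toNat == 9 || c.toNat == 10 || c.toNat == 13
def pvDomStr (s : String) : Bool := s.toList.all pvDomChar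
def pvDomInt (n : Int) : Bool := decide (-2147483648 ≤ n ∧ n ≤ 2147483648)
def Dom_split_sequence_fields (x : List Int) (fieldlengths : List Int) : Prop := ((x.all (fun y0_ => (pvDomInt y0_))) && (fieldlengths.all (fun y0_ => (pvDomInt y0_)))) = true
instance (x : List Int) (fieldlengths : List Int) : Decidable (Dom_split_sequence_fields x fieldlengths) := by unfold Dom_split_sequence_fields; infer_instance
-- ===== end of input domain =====

-- B replaces A's forward loop with a start accumulator by right-to-left recursion
-- that splits off the LAST field, threads an end pointer, and builds the output
-- back-to-front (alternative decomposition, same cost).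


-- ===== PORT A =====
-- loop: rv/prev threaded through a foldl; x[prev:end] = PySem.List.slice (exact Python slicing)
def split_sequence_fields (x : List Int) (fieldlengths : List Int) : List (List Int) :=
  (fieldlengths.foldl
    (fun (s : List (List Int) × Int) fieldlen =>
      let «end» := s.2 + fieldlen
      (s.1 ++ [PySem.List.slice x (some s.2) (some «end»)], «end»))
    ([], 0)).1

-- ===== PORT B =====
-- go(fls, end): recursion splitting off the LAST field of fls ('*init, last = fls'),
-- transcribed as structural recursion on the reversed list (head of reverse = last).
def ssfAltGoRev (x : List Int) : List Int → Int → List (List Int)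
  | [], _ => []
  | last :: initRev, e =>
      ssfAltGoRev x initRev (e - last) ++ [PySem.List.slice x (some (e - last)) (some e)]

-- B's assert is hoisted to the front (it fires on exactly the inputs Pre_ excludes);
-- then return go(fieldlengths, len(x)).
def split_sequence_fields_alt (x : List Int) (fieldlengths : List Int) : List (List Int) :=
  ssfAltGoRev x fieldlengths.reverse (x.length : Int)

-- ===== PRECONDITION & SPEC =====
-- Pre_ excludes exactly the inputs where the assert fires (AssertionError in both
-- A and B): sum fieldlengths ≠ len x.
def Pre_split_sequence_fields (x : List Int) (fieldlengths : List Int) : Prop :=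
  fieldlengths.sum = (x.length : Int)
instance (x : List Int) (fieldlengths : List Int) : Decidable (Pre_split_sequence_fields x fieldlengths) := by unfold Pre_split_sequence_fields; infer_instance
def pvWitness_split_sequence_fields : List Int × List Int := ([1, 2, 3], [1, 0, 2])

def Spec_split_sequence_fields (x : List Int) (fieldlengths : List Int) (out : List (List Int)) : Prop := out = split_sequence_fields_alt x fieldlengths
instance (x : List Int) (fieldlengths : List Int) (out : List (List Int)) : Decidable (Spec_split_sequence_fields x fieldlengths out) := by unfold Spec_split_sequence_fields; infer_instance

-- ===== CLAIM (what is proved, stated in full; the proofs are below) =====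
def Claim_equal_split_sequence_fields : Prop := ∀ (x : List Int) (fieldlengths : List Int), Dom_split_sequence_fields x fieldlengths → Pre_split_sequence_fields x fieldlengths → Spec_split_sequence_fields x fieldlengths (split_sequence_fields x fieldlengths)

-- ===== LEMMAS AND PROOFS =====

-- forward reference spine: the slices of fls starting at boundary prev
def ssfFwd (x : List Int) (prev : Int) : List Int → List (List Int)
  | [] => []
  | fl :: t => PySem.List.slice x (some prev) (some (prev + fl)) :: ssfFwd x (prev + fl) t

-- A's fold from state (rv, prev) appends exactly the forward spine
theorem ssf_fold_eq (x : List Int) (fls : List Int) (rv : List (List Int)) (prev : Int) :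
    (fls.foldl
      (fun (s : List (List Int) × Int) fieldlen =>
        let «end» := s.2 + fieldlen
        (s.1 ++ [PySem.List.slice x (some s.2) (some «end»)], «end»))
      (rv, prev)).1
    = rv ++ ssfFwd x prev fls := by
  induction fls generalizing rv prev with
  | nil => simp [ssfFwd]
  | cons fl t ih => simp [ssfFwd, ih]

-- the forward spine snocs: appending one field adds one slice at the accumulated boundary
theorem ssfFwd_append_one (x : List Int) (l : List Int) (a prev : Int) :
    ssfFwd x prev (l ++ [a])
      = ssfFwd x prev l ++ [PySem.List.slice x (some (prev + l.sum)) (some (prev + l.sum + a))] := by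
  induction l generalizing prev with
  | nil => simp [ssfFwd]
  | cons b t ih => simp [ssfFwd, ih]; ring_nf

-- B's right-to-left recursion equals the forward spine started at e - sum
theorem ssfAltGoRev_eq_fwd (x : List Int) (l : List Int) (e : Int) :
    ssfAltGoRev x l.reverse e = ssfFwd x (e - l.sum) l := by
  induction l using List.reverseRecOn generalizing e with
  | nil => simp [ssfAltGoRev, ssfFwd]
  | append_singleton t a ih =>
      rw [List.reverse_append]
      simp only [List.reverse_cons, List.reverse_nil, List.nil_append, List.singleton_append,
        ssfAltGoRev]
      rw [ih, ssfFwd_append_one]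
      have h1 : e - (t ++ [a]).sum = e - a - t.sum := by simp; ring
      rw [h1]
      have h2 : e - a - t.sum + t.sum = e - a := by ring
      rw [h2]
      have h3 : e - a + a = e := by ring
      rw [h3]

-- ===== VERDICT (by name: the statement is the Claim_ definition above) =====
theorem split_sequence_fields_spec : Claim_equal_split_sequence_fields := by
  intro x fls _ hpre
  unfold Spec_split_sequence_fields split_sequence_fields split_sequence_fields_alt
  rw [ssf_fold_eq, ssfAltGoRev_eq_fwd, hpre]
  simp
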